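-- pv_equiv track=rewrite | github.com/Control39/cognitive-systems-architecture | scripts/gordon/DIALOGUE_PATTERN_EXTRACTOR.py | extract_dialogue_patterns
-- ===== SOURCE A (Python) =====
-- from collections import defaultdict
--
-- PATTERN_KEYWORDS = {
--     'architecture': [
--         'architecture', 'design', 'system', 'layer', 'component',
--         'pattern', 'structure', 'framework', 'blueprint'
--     ],
--     'methodology': [
--         'methodology', 'method', 'approach', 'process', 'framework',
--         'principle', 'practice', 'standard', 'convention'
--     ],
--     'ai_orchestration': [
--         'orchestration', 'integration', 'rag', 'reasoning', 'llm',
--         'model', 'prompt', 'chain', 'pipeline', 'workflow'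
--     ],
--     'knowledge_management': [
--         'knowledge', 'memory', 'storage', 'database', 'index',
--         'search', 'retrieve', 'organize', 'taxonomy', 'classification'
--     ],
--     'decision_making': [
--         'decision', 'choose', 'select', 'option', 'trade-off',
--         'trade-off', 'pros', 'cons', 'risk', 'benefit'
--     ],
--     'learning': [
--         'learn', 'learning', 'education', 'skill', 'growth',
--         'progress', 'improvement', 'development', 'training'
--     ],
--     'business': [
--         'business', 'market', 'revenue', 'cost', 'roi', 'value',
--         'customer', 'user', 'adoption', 'scale'
--     ],
--     'technical_depth': [
--         'docker', 'kubernetes', 'python', 'javascript', 'database',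
--         'api', 'deployment', 'testing', 'debugging', 'optimization'
--     ],
--     'problem_solving': [
--         'problem', 'issue', 'challenge', 'solve', 'solution',
--         'debug', 'troubleshoot', 'fix', 'improve', 'refactor'
--     ],
--     'system_thinking': [
--         'system', 'feedback', 'loop', 'cycle', 'iterate',
--         'evolve', 'adapt', 'resilience', 'scalability'
--     ]
-- }
--
-- def extract_dialogue_patterns(dialogue_text):
--     """Извлекает паттерны из текста диалога"""
--     if not dialogue_text:
--         return {}
--
--     patterns = defaultdict(list)
--     lines = dialogue_text.split('\n')
--
--     current_pattern = None
--     for line in lines: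
--         line_lower = line.lower()
--
--         # Ищем какой паттерн это может быть
--         for category, keywords in PATTERN_KEYWORDS.items():
--             for keyword in keywords:
--                 if keyword in line_lower:
--                     patterns[category].append(line.strip())
--                     break
--
--     return dict(patterns)
-- ===== SOURCE B (Python) =====
-- PATTERN_KEYWORDS = {
--     'architecture': [
--         'architecture', 'design', 'system', 'layer', 'component',
--         'pattern', 'structure', 'framework', 'blueprint'
--     ],
--     'methodology': [
--         'methodology', 'method', 'approach', 'process', 'framework',
--         'principle', 'practice', 'standard', 'convention'
--     ],
--     'ai_orchestration': [
--         'orchestration', 'integration', 'rag', 'reasoning', 'llm',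
--         'model', 'prompt', 'chain', 'pipeline', 'workflow'
--     ],
--     'knowledge_management': [
--         'knowledge', 'memory', 'storage', 'database', 'index',
--         'search', 'retrieve', 'organize', 'taxonomy', 'classification'
--     ],
--     'decision_making': [
--         'decision', 'choose', 'select', 'option', 'trade-off',
--         'trade-off', 'pros', 'cons', 'risk', 'benefit'
--     ],
--     'learning': [
--         'learn', 'learning', 'education', 'skill', 'growth',
--         'progress', 'improvement', 'development', 'training'
--     ],
--     'business': [
--         'business', 'market', 'revenue', 'cost', 'roi', 'value',
--         'customer', 'user', 'adoption', 'scale'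
--     ],
--     'technical_depth': [
--         'docker', 'kubernetes', 'python', 'javascript', 'database',
--         'api', 'deployment', 'testing', 'debugging', 'optimization'
--     ],
--     'problem_solving': [
--         'problem', 'issue', 'challenge', 'solve', 'solution',
--         'debug', 'troubleshoot', 'fix', 'improve', 'refactor'
--     ],
--     'system_thinking': [
--         'system', 'feedback', 'loop', 'cycle', 'iterate',
--         'evolve', 'adapt', 'resilience', 'scalability'
--     ]
-- }
--
-- # Inverted index, built once: keyword -> categories that contain it.
-- KEYWORD_CATEGORIES = {}
-- for _cat, _kws in PATTERN_KEYWORDS.items():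
--     for _kw in _kws:
--         KEYWORD_CATEGORIES.setdefault(_kw, []).append(_cat)
--
-- CATEGORY_ORDER = list(PATTERN_KEYWORDS)
--
--
-- def extract_dialogue_patterns(dialogue_text):
--     """Извлекает паттерны из текста диалога"""
--     if not dialogue_text:
--         return {}
--
--     patterns = {}
--     for line in dialogue_text.split('\n'):
--         line_lower = line.lower()
--         hit = set()
--         for keyword, cats in KEYWORD_CATEGORIES.items():
--             if keyword in line_lower:
--                 hit.update(cats)
--         if hit:
--             stripped = line.strip()
--             for category in CATEGORY_ORDER:
--                 if category in hit:
--                     patterns.setdefault(category, []).append(stripped)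
--     return patterns
-- ===== Notes on version B (the rewrite author's own statement) =====
-- stated objective: alternative
-- what changed: B builds once an inverted index keyword->categories and per line collects the matching categories into a set before appending, replacing A's per-line category-by-category keyword scan with break.
import Mathlib
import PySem

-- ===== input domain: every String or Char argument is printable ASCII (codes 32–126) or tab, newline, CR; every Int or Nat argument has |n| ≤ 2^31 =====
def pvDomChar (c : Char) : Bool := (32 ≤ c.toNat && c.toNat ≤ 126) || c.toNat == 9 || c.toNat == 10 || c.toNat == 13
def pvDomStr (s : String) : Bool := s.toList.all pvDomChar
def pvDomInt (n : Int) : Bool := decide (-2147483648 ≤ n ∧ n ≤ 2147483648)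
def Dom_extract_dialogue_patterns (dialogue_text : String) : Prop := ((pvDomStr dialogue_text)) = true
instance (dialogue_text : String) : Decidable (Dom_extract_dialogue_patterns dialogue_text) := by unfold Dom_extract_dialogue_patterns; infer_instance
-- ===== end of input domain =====

-- B replaces A's per-line category×keyword double scan by a keyword→categories inverted
-- index built once; per line the matching categories are collected in a set (objective: alternative).

-- ===== PORT A =====
-- PATTERN_KEYWORDS, in insertion order
def pvKW : List (String × List String) := [
    ("architecture", ["architecture", "design", "system", "layer", "component", "pattern", "structure", "framework", "blueprint"]),
    ("methodology", ["methodology", "method", "approach", "process", "framework", "principle", "practice", "standard", "convention"]),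
    ("ai_orchestration", ["orchestration", "integration", "rag", "reasoning", "llm", "model", "prompt", "chain", "pipeline", "workflow"]),
    ("knowledge_management", ["knowledge", "memory", "storage", "database", "index", "search", "retrieve", "organize", "taxonomy", "classification"]),
    ("decision_making", ["decision", "choose", "select", "option", "trade-off", "trade-off", "pros", "cons", "risk", "benefit"]),
    ("learning", ["learn", "learning", "education", "skill", "growth", "progress", "improvement", "development", "training"]),
    ("business", ["business", "market", "revenue", "cost", "roi", "value", "customer", "user", "adoption", "scale"]),
    ("technical_depth", ["docker", "kubernetes", "python", "javascript", "database", "api", "deployment", "testing", "debugging", "optimization"]),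
    ("problem_solving", ["problem", "issue", "challenge", "solve", "solution", "debug", "troubleshoot", "fix", "improve", "refactor"]),
    ("system_thinking", ["system", "feedback", "loop", "cycle", "iterate", "evolve", "adapt", "resilience", "scalability"]),

]

-- the inner 'for keyword in keywords: if keyword in line_lower: patterns[category].append(line.strip()); break'
-- (defaultdict append = insert of getD [] ++ [v]: new keys go to the end, existing keys keep their place)
def pvInnerA (pats : PySem.Dict String (List String)) (cat : String) (kws : List String)
    (low stripped : String) : PySem.Dict String (List String) :=
  match kws with
  | [] => pats
  | k :: rest =>
    if PySem.Str.isIn k low then pats.insert cat (pats.getD cat [] ++ [stripped])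
    else pvInnerA pats cat rest low stripped

-- the body of 'for line in lines'
def pvLineStepA (pats : PySem.Dict String (List String)) (line : String) :
    PySem.Dict String (List String) :=
  pvKW.foldl (fun p ck => pvInnerA p ck.1 ck.2 (PySem.Str.lower line) (PySem.Str.strip line)) pats

def extract_dialogue_patterns (dialogue_text : String) : List (String × List String) :=
  if dialogue_text == "" then []
  else
    (((PySem.Str.split? dialogue_text "\n").getD []).foldl pvLineStepA PySem.Dict.empty).items

-- ===== PORT B =====
-- KEYWORD_CATEGORIES: the module-level double loop of Source B ('setdefault(kw, []).append(cat)')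
def pvIndex : PySem.Dict String (List String) :=
  pvKW.foldl (fun d ck => ck.2.foldl (fun d kw => d.insert kw (d.getD kw [] ++ [ck.1])) d)
    PySem.Dict.empty

-- CATEGORY_ORDER = list(PATTERN_KEYWORDS)
def pvCategoryOrder : List String := pvKW.map Prod.fst

-- 'hit = set(); for keyword, cats in KEYWORD_CATEGORIES.items(): if keyword in line_lower: hit.update(cats)'
def pvHit (low : String) : PySem.Set String :=
  pvIndex.items.foldl
    (fun s kc => if PySem.Str.isIn kc.1 low then PySem.Set.update s kc.2 else s)
    PySem.Set.empty

-- the body of 'for line in dialogue_text.split('\n')'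
def pvLineStepB (pats : PySem.Dict String (List String)) (line : String) :
    PySem.Dict String (List String) :=
  let hit := pvHit (PySem.Str.lower line)
  if hit.isEmpty then pats
  else
    pvCategoryOrder.foldl
      (fun p c =>
        if PySem.Set.contains hit c then p.insert c (p.getD c [] ++ [PySem.Str.strip line])
        else p)
      pats

def extract_dialogue_patterns_alt (dialogue_text : String) : List (String × List String) :=
  if dialogue_text == "" then []
  else
    (((PySem.Str.split? dialogue_text "\n").getD []).foldl pvLineStepB PySem.Dict.empty).items

-- ===== PRECONDITION & SPEC =====
def Spec_extract_dialogue_patterns (dialogue_text : String) (out : List (String × List String)) : Prop := out = extract_dialogue_patterns_alt dialogue_text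
instance (dialogue_text : String) (out : List (String × List String)) : Decidable (Spec_extract_dialogue_patterns dialogue_text out) := by unfold Spec_extract_dialogue_patterns; infer_instance

-- ===== CLAIM (what is proved, stated in full; the proofs are below) =====
def Claim_equal_extract_dialogue_patterns : Prop := ∀ (dialogue_text : String), Dom_extract_dialogue_patterns dialogue_text → Spec_extract_dialogue_patterns dialogue_text (extract_dialogue_patterns dialogue_text)

-- ===== LEMMAS AND PROOFS =====

-- the literal value of the inverted index's items (checked by the kernel)
def pvIndexItems : List (String × List String) := [
    ("architecture", ["architecture"]),
    ("design", ["architecture"]),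
    ("system", ["architecture", "system_thinking"]),
    ("layer", ["architecture"]),
    ("component", ["architecture"]),
    ("pattern", ["architecture"]),
    ("structure", ["architecture"]),
    ("framework", ["architecture", "methodology"]),
    ("blueprint", ["architecture"]),
    ("methodology", ["methodology"]),
    ("method", ["methodology"]),
    ("approach", ["methodology"]),
    ("process", ["methodology"]),
    ("principle", ["methodology"]),
    ("practice", ["methodology"]),
    ("standard", ["methodology"]),
    ("convention", ["methodology"]),
    ("orchestration", ["ai_orchestration"]),
    ("integration", ["ai_orchestration"]),
    ("rag", ["ai_orchestration"]),
    ("reasoning", ["ai_orchestration"]),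
    ("llm", ["ai_orchestration"]),
    ("model", ["ai_orchestration"]),
    ("prompt", ["ai_orchestration"]),
    ("chain", ["ai_orchestration"]),
    ("pipeline", ["ai_orchestration"]),
    ("workflow", ["ai_orchestration"]),
    ("knowledge", ["knowledge_management"]),
    ("memory", ["knowledge_management"]),
    ("storage", ["knowledge_management"]),
    ("database", ["knowledge_management", "technical_depth"]),
    ("index", ["knowledge_management"]),
    ("search", ["knowledge_management"]),
    ("retrieve", ["knowledge_management"]),
    ("organize", ["knowledge_management"]),
    ("taxonomy", ["knowledge_management"]),
    ("classification", ["knowledge_management"]),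
    ("decision", ["decision_making"]),
    ("choose", ["decision_making"]),
    ("select", ["decision_making"]),
    ("option", ["decision_making"]),
    ("trade-off", ["decision_making", "decision_making"]),
    ("pros", ["decision_making"]),
    ("cons", ["decision_making"]),
    ("risk", ["decision_making"]),
    ("benefit", ["decision_making"]),
    ("learn", ["learning"]),
    ("learning", ["learning"]),
    ("education", ["learning"]),
    ("skill", ["learning"]),
    ("growth", ["learning"]),
    ("progress", ["learning"]),
    ("improvement", ["learning"]),
    ("development", ["learning"]),
    ("training", ["learning"]),
    ("business", ["business"]),
    ("market", ["business"]),
    ("revenue", ["business"]),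
    ("cost", ["business"]),
    ("roi", ["business"]),
    ("value", ["business"]),
    ("customer", ["business"]),
    ("user", ["business"]),
    ("adoption", ["business"]),
    ("scale", ["business"]),
    ("docker", ["technical_depth"]),
    ("kubernetes", ["technical_depth"]),
    ("python", ["technical_depth"]),
    ("javascript", ["technical_depth"]),
    ("api", ["technical_depth"]),
    ("deployment", ["technical_depth"]),
    ("testing", ["technical_depth"]),
    ("debugging", ["technical_depth"]),
    ("optimization", ["technical_depth"]),
    ("problem", ["problem_solving"]),
    ("issue", ["problem_solving"]),
    ("challenge", ["problem_solving"]),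
    ("solve", ["problem_solving"]),
    ("solution", ["problem_solving"]),
    ("debug", ["problem_solving"]),
    ("troubleshoot", ["problem_solving"]),
    ("fix", ["problem_solving"]),
    ("improve", ["problem_solving"]),
    ("refactor", ["problem_solving"]),
    ("feedback", ["system_thinking"]),
    ("loop", ["system_thinking"]),
    ("cycle", ["system_thinking"]),
    ("iterate", ["system_thinking"]),
    ("evolve", ["system_thinking"]),
    ("adapt", ["system_thinking"]),
    ("resilience", ["system_thinking"]),
    ("scalability", ["system_thinking"]),

]

set_option maxRecDepth 100000 in
lemma pvIndex_items : pvIndex.items = pvIndexItems := by decide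

lemma pvInnerA_eq (pats : PySem.Dict String (List String)) (cat : String) (kws : List String)
    (low stripped : String) :
    pvInnerA pats cat kws low stripped =
      if kws.any (fun k => PySem.Str.isIn k low) then
        pats.insert cat (pats.getD cat [] ++ [stripped])
      else pats := by
  induction kws with
  | nil => simp [pvInnerA]
  | cons k rest ih =>
    simp only [pvInnerA, List.any_cons, ih]
    by_cases h : PySem.Str.isIn k low = true <;> simp only [PySem.Str.isIn_eq] at h <;> simp [h]

lemma foldl_id {α β : Type} (l : List β) (a : α) : l.foldl (fun p _ => p) a = a := by
  induction l generalizing a with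
  | nil => rfl
  | cons x xs ih => exact ih a

lemma contains_foldl_hit (low : String) (l : List (String × List String))
    (s : PySem.Set String) (c : String) :
    (PySem.Set.contains
        (l.foldl (fun s kc => if PySem.Str.isIn kc.1 low then PySem.Set.update s kc.2 else s) s)
        c = true) ↔
      PySem.Set.contains s c = true ∨ ∃ p ∈ l, PySem.Str.isIn p.1 low = true ∧ c ∈ p.2 := by
  induction l generalizing s with
  | nil => simp
  | cons kc rest ih =>
    simp only [List.foldl_cons]
    by_cases h : PySem.Str.isIn kc.1 low = true
    · rw [if_pos h, ih]
      simp only [PySem.Str.isIn_eq] at h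
      simp [h]
      tauto
    · rw [if_neg h, ih]
      simp only [PySem.Str.isIn_eq, Bool.not_eq_true] at h
      simp [h]

lemma contains_hit (low c : String) :
    (PySem.Set.contains (pvHit low) c = true) ↔
      ∃ p ∈ pvIndexItems, PySem.Str.isIn p.1 low = true ∧ c ∈ p.2 := by
  rw [pvHit, pvIndex_items, contains_foldl_hit]
  simp [PySem.Set.empty]

lemma any_ext {l l' : List String} (h : ∀ x, x ∈ l ↔ x ∈ l') (f : String → Bool) :
    l.any f = l'.any f := by
  rw [Bool.eq_iff_iff, List.any_eq_true, List.any_eq_true]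
  constructor <;> rintro ⟨x, hx, hf⟩
  · exact ⟨x, (h x).mp hx, hf⟩
  · exact ⟨x, (h x).mpr hx, hf⟩

lemma subs_mem {l l' : List String} (h1 : l.all (fun x => decide (x ∈ l')) = true)
    (h2 : l'.all (fun x => decide (x ∈ l)) = true) : ∀ x, x ∈ l ↔ x ∈ l' := by
  simp only [List.all_eq_true, decide_eq_true_eq] at h1 h2
  exact fun x => ⟨fun hx => h1 x hx, fun hx => h2 x hx⟩

lemma contains_hit_any (low c : String) :
    PySem.Set.contains (pvHit low) c =
      ((pvIndexItems.filter (fun p => decide (c ∈ p.2))).map Prod.fst).any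
        (fun k => PySem.Str.isIn k low) := by
  rw [Bool.eq_iff_iff, contains_hit, List.any_eq_true]
  simp only [List.mem_map, List.mem_filter, decide_eq_true_eq]
  constructor
  · rintro ⟨p, hp, hf, hc⟩
    exact ⟨p.1, ⟨p, ⟨hp, hc⟩, rfl⟩, hf⟩
  · rintro ⟨k, ⟨p, ⟨hp, hc⟩, rfl⟩, hf⟩
    exact ⟨p, hp, hf, hc⟩

lemma cond_eq (low : String) :
    ∀ ck ∈ pvKW,
      PySem.Set.contains (pvHit low) ck.1 = ck.2.any (fun k => PySem.Str.isIn k low) := by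
  intro ck hck
  fin_cases hck <;>
    · rw [contains_hit_any]
      exact any_ext (subs_mem (by decide) (by decide)) _

lemma hit_empty_contains (low : String) (h : (pvHit low).isEmpty = true) (c : String) :
    PySem.Set.contains (pvHit low) c = false := by
  rw [List.isEmpty_iff] at h
  simp [h, PySem.Set.contains]

lemma lineStep_eq : pvLineStepA = pvLineStepB := by
  funext pats line
  unfold pvLineStepA pvLineStepB
  by_cases hE : (pvHit (PySem.Str.lower line)).isEmpty = true
  · simp only [hE, if_pos]
    rw [PySem.List.foldl_congr_mem (g := fun p _ => p)]
    · exact foldl_id pvKW pats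
    · intro acc ck hck
      rw [pvInnerA_eq, ← cond_eq _ ck hck, hit_empty_contains _ hE]
      simp
  · simp only [hE, if_neg, Bool.not_eq_true]
    unfold pvCategoryOrder
    rw [List.foldl_map]
    apply PySem.List.foldl_congr_mem
    intro acc ck hck
    rw [pvInnerA_eq, cond_eq _ ck hck]

-- ===== VERDICT (by name: the statement is the Claim_ definition above) =====
theorem extract_dialogue_patterns_spec : Claim_equal_extract_dialogue_patterns := by
  intro t _
  unfold Spec_extract_dialogue_patterns extract_dialogue_patterns extract_dialogue_patterns_alt
  rw [lineStep_eq]
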